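-- pv_equiv track=rewrite | github.com/TomaszChowaniec1/Functions | 7.19.py | f
-- ===== SOURCE A (Python) =====
-- def f(number):
--     number = str(abs(number))
--     counts = {}
--
--     for digit in number:
--         counts[digit] = counts.get(digit, 0) + 1
--
--     total = 0
--     for digit, count in counts.items():
--         if count > 1:
--             total += int(digit) * count
--     return total
-- ===== SOURCE B (Python) =====
-- def f(number):
--     total = 0
--     run_char = None
--     run_len = 0
--     for ch in sorted(str(abs(number))):
--         if ch == run_char:
--             run_len += 1
--         else:
--             if run_len > 1:
--                 total += int(run_char) * run_len
--             run_char, run_len = ch, 1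
--     if run_len > 1:
--         total += int(run_char) * run_len
--     return total
-- ===== Notes on version B (the rewrite author's own statement) =====
-- stated objective: alternative
-- what changed: Replaces A's frequency-dictionary pass plus a second pass over its items by sorting the digit string and summing the consecutive runs of repeated digits in a single scan.
import Mathlib
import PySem

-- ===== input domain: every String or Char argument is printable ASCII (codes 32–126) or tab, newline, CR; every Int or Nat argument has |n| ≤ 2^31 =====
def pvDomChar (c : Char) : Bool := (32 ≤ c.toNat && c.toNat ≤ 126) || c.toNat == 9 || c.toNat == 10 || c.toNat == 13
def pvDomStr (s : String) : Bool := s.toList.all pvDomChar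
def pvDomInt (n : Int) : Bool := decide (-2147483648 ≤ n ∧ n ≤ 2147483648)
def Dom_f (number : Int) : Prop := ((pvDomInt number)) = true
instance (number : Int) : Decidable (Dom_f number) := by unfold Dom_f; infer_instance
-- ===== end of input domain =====

-- B replaces A's frequency-dictionary two-pass computation by a sort-then-scan over
-- consecutive equal runs of the sorted digit string (objective: alternative).

-- ===== PORT A =====
-- int(digit) on a one-character string; exact here: the characters come from str(abs(number)), all decimal digits
def digInt (c : Char) : Int := (PySem.Int.ofChars? [c]).getD 0

def f (number : Int) : Int :=
  let s := PySem.Int.toChars |number|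
  let counts := s.foldl (fun d c => d.insert c (d.getD c 0 + 1)) PySem.Dict.empty
  counts.items.foldl (fun t p => if p.2 > 1 then t + digInt p.1 * p.2 else t) 0

-- ===== PORT B =====
-- the for-loop of Source B: current run character c, current run length k, accumulated total
def runsB : List Char → Char → Int → Int → Int
  | [], c, k, total => if k > 1 then total + digInt c * k else total
  | x :: rest, c, k, total =>
      if x == c then runsB rest c (k + 1) total
      else runsB rest x 1 (if k > 1 then total + digInt c * k else total)

def f_alt (number : Int) : Int :=
  match PySem.List.sorted (PySem.Int.toChars |number|) (fun x => x) false with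
  | [] => 0
  | c :: rest => runsB rest c 1 0

-- ===== PRECONDITION & SPEC =====
def Spec_f (number : Int) (out : Int) : Prop := out = f_alt number
instance (number : Int) (out : Int) : Decidable (Spec_f number out) := by unfold Spec_f; infer_instance

-- ===== CLAIM (what is proved, stated in full; the proofs are below) =====
def Claim_equal_f : Prop := ∀ (number : Int), Dom_f number → Spec_f number (f number)

-- ===== LEMMAS AND PROOFS =====

-- the common value both programs compute: over the distinct characters of m,
-- the sum of digInt d * count d over the characters occurring more than once
def gC (m : List Char) (d : Char) : Int :=
  if 1 < m.count d then digInt d * (m.count d : Int) else 0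

def GC (m : List Char) : Int := m.toFinset.sum (gC m)

theorem GC_nil : GC [] = 0 := by simp [GC]

theorem GC_perm {m m' : List Char} (hp : m.Perm m') : GC m = GC m' := by
  unfold GC
  rw [List.toFinset_eq_of_perm m m' hp]
  refine Finset.sum_congr rfl fun d _ => ?_
  unfold gC
  rw [hp.count_eq]

theorem GC_split (c : Char) (n : Nat) (m : List Char) (hc : c ∉ m) (hn : 1 ≤ n) :
    GC (List.replicate n c ++ m) =
      (if (1:Int) < (n:Int) then digInt c * (n:Int) else 0) + GC m := by
  have hne : n ≠ 0 := by omega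
  have hcf : c ∉ m.toFinset := by simpa using hc
  have hcnt0 : m.count c = 0 := List.count_eq_zero.mpr hc
  unfold GC
  rw [List.toFinset_append, List.toFinset_replicate_of_ne_zero hne,
    Finset.singleton_union, Finset.sum_insert hcf]
  have h1 : gC (List.replicate n c ++ m) c = if (1:Int) < (n:Int) then digInt c * (n:Int) else 0 := by
    unfold gC
    simp [List.count_append, List.count_replicate_self, hcnt0, Nat.one_lt_cast]
  have h2 : ∀ d ∈ m.toFinset, gC (List.replicate n c ++ m) d = gC m d := by
    intro d hd
    have hdc : d ≠ c := fun h => hcf (h ▸ hd)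
    have hrep : (List.replicate n c).count d = 0 := by
      simp [List.count_replicate, Ne.symm hdc]
    unfold gC
    rw [List.count_append, hrep]
    simp
  rw [h1, Finset.sum_congr rfl h2]

theorem runsB_eq (rest : List Char) : ∀ (c : Char) (n : Nat) (total : Int),
    rest.Pairwise (· ≤ ·) → (∀ x ∈ rest, c ≤ x) → 1 ≤ n →
    runsB rest c (n:Int) total = total + GC (List.replicate n c ++ rest) := by
  induction rest with
  | nil =>
      intro c n total _ _ hn
      simp only [runsB]
      rw [GC_split c n [] (by simp) hn, GC_nil]
      simp only [gt_iff_lt, Nat.one_lt_cast]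
      split_ifs <;> ring
  | cons x rest ih =>
      intro c n total hs hge hn
      have hs' : rest.Pairwise (· ≤ ·) := hs.tail
      have hxle : ∀ y ∈ rest, x ≤ y := fun y hy => (List.pairwise_cons.mp hs).1 y hy
      have hcx : c ≤ x := hge x (by simp)
      by_cases hxc : x = c
      · subst hxc
        simp only [runsB, BEq.rfl, if_true]
        have : ((n:Int) + 1) = ((n+1 : Nat) : Int) := by push_cast; ring
        rw [this, ih x (n+1) total hs' hxle (by omega)]
        have hl : List.replicate (n+1) x ++ rest = List.replicate n x ++ (x :: rest) := by
          rw [List.replicate_succ']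
          simp
        rw [hl]
      · have hbeq : (x == c) = false := by simp [hxc]
        simp only [runsB, hbeq, Bool.false_eq_true, if_false]
        have hIH := ih x 1 (if (n:Int) > 1 then total + digInt c * (n:Int) else total) hs' hxle le_rfl
        rw [Nat.cast_one] at hIH
        rw [hIH]
        have hcnot : c ∉ x :: rest := by
          intro hmem
          rcases List.mem_cons.mp hmem with h | h
          · exact hxc h.symm
          · have := hxle c h
            have : x = c := le_antisymm this hcx
            exact hxc this
        rw [GC_split c n (x :: rest) hcnot hn]
        simp only [List.replicate_one, List.singleton_append, gt_iff_lt, Nat.one_lt_cast]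
        split_ifs <;> ring

theorem foldl_items (l : List Char) (ds : List Char) (a : Int) :
    (ds.map (fun d => (d, (l.count d : Int)))).foldl
        (fun t p => if p.2 > 1 then t + digInt p.1 * p.2 else t) a
      = a + (ds.map (gC l)).sum := by
  induction ds generalizing a with
  | nil => simp
  | cons d ds ih =>
      simp only [List.map_cons, List.foldl_cons, List.sum_cons, ih]
      unfold gC
      simp only [gt_iff_lt, Nat.one_lt_cast]
      split_ifs <;> ring

theorem f_eq_GC (number : Int) : f number = GC (PySem.Int.toChars |number|) := by
  set l := PySem.Int.toChars |number| with hl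
  show (l.foldl (fun d c => d.insert c (d.getD c 0 + 1)) PySem.Dict.empty).items.foldl
      (fun t p => if p.2 > 1 then t + digInt p.1 * p.2 else t) 0 = GC l
  rw [PySem.Dict.foldl_insert_getD_add_one_eq_counter, PySem.Dict.items_counter, foldl_items]
  have hnd : (PySem.Set.ofList l).Nodup := PySem.Set.nodup_ofList l
  have hfs : (PySem.Set.ofList l).toFinset = l.toFinset := by
    ext d
    simp [List.mem_toFinset, PySem.Set.mem_ofList]
  rw [← List.sum_toFinset (gC l) hnd, hfs, zero_add]
  rfl

theorem f_alt_eq_GC (number : Int) : f_alt number = GC (PySem.Int.toChars |number|) := by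
  set l := PySem.Int.toChars |number| with hl
  have hperm := PySem.List.sorted_perm l (fun x => x) false
  unfold f_alt
  rw [← hl]
  rcases h : PySem.List.sorted l (fun x => x) false with _ | ⟨c, rest⟩
  · rw [h] at hperm
    have : l = [] := hperm.symm.eq_nil
    rw [this, GC_nil]
  · rw [h] at hperm
    have hpw : (c :: rest).Pairwise (· ≤ ·) := by
      have := PySem.List.sorted_pairwise l (fun x => x)
      rw [h] at this
      exact this
    show runsB rest c 1 0 = GC l
    have h0 := runsB_eq rest c 1 0 hpw.tail (fun x hx => (List.pairwise_cons.mp hpw).1 x hx) le_rfl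
    rw [Nat.cast_one] at h0
    rw [h0]
    simp only [List.replicate_one, List.singleton_append]
    rw [zero_add]
    exact GC_perm hperm

-- ===== VERDICT (by name: the statement is the Claim_ definition above) =====
theorem f_spec : Claim_equal_f := by
  intro number _
  unfold Spec_f
  rw [f_eq_GC, f_alt_eq_GC]
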